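-- pv_equiv track=rewrite | github.com/iansealy/projecteuler | optimal/36.py | make_palindrome_base_2
-- ===== SOURCE A (Python) =====
-- def make_palindrome_base_2(number, odd_length):
--     """Get palindrome in base 2"""
--
--     result = number
--
--     if odd_length:
--         number >>= 1
--
--     while number > 0:
--         result = (result << 1) + (number & 1)
--         number >>= 1
--
--     return(result)
-- ===== SOURCE B (Python) =====
-- def make_palindrome_base_2(number, odd_length):
--     """Get palindrome in base 2"""
--     if number <= 0:
--         return number
--     s = bin(number)[2:]
--     tail = s[-2::-1] if odd_length else s[::-1]
--     return int(s + tail, 2)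
-- ===== Notes on version B (the rewrite author's own statement) =====
-- stated objective: idiomatic
-- what changed: B builds the palindrome from the binary digit string via slicing/reversal and a single int(...,2) parse instead of A's shift-and-OR accumulator loop.
import Mathlib
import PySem

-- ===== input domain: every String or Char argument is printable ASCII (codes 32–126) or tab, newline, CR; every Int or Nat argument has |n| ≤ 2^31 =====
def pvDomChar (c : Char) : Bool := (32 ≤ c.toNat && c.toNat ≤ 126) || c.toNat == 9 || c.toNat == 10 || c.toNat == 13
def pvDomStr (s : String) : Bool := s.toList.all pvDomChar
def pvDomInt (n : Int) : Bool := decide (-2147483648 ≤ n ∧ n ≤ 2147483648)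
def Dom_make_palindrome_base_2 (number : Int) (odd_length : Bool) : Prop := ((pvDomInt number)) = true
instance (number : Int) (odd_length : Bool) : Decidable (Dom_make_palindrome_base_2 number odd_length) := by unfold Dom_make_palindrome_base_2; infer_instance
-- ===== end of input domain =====

-- B builds the palindrome from the binary digit string by slicing/reversal instead of A's shift-and-OR loop; objective: idiomatic.

-- ===== PORT A =====
-- while number > 0: result = (result << 1) + (number & 1); number >>= 1
-- Python's `n >> 1` is exactly floor-division by 2 and `n & 1` is exactly `n mod 2` (floor
-- semantics) for every int, so they are ported as PySem.Int.floordiv / PySem.Int.mod.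
def pvLoopA (number result : Int) : Int :=
  if h : number > 0 then
    pvLoopA (PySem.Int.floordiv number 2) (result * 2 + PySem.Int.mod number 2)
  else result
termination_by number.toNat
decreasing_by
  have : PySem.Int.floordiv number 2 = number / 2 := PySem.Int.floordiv_eq_ediv_of_pos (by omega)
  rw [this]; omega

def make_palindrome_base_2 (number : Int) (odd_length : Bool) : Int :=
  pvLoopA (if odd_length then PySem.Int.floordiv number 2 else number) number

-- ===== PORT B =====
-- bin(number)[2:] as a list of binary digits, MSB first
def pvBits : Nat → List Int
  | 0 => []
  | n+1 => pvBits ((n+1) / 2) ++ [(((n+1) % 2 : Nat) : Int)]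

-- int(digits, 2)
def pvFromBits (l : List Int) : Int := l.foldl (fun a b => 2 * a + b) 0

def make_palindrome_base_2_alt (number : Int) (odd_length : Bool) : Int :=
  if number ≤ 0 then number
  else
    let s := pvBits number.toNat
    let tail := if odd_length then s.dropLast.reverse else s.reverse
    pvFromBits (s ++ tail)

-- ===== PRECONDITION & SPEC =====
def Spec_make_palindrome_base_2 (number : Int) (odd_length : Bool) (out : Int) : Prop := out = make_palindrome_base_2_alt number odd_length
instance (number : Int) (odd_length : Bool) (out : Int) : Decidable (Spec_make_palindrome_base_2 number odd_length out) := by unfold Spec_make_palindrome_base_2; infer_instance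

-- ===== CLAIM (what is proved, stated in full; the proofs are below) =====
def Claim_equal_make_palindrome_base_2 : Prop := ∀ (number : Int) (odd_length : Bool), Dom_make_palindrome_base_2 number odd_length → Spec_make_palindrome_base_2 number odd_length (make_palindrome_base_2 number odd_length)

-- ===== LEMMAS AND PROOFS =====

theorem pvFdiv2 (k : Nat) : PySem.Int.floordiv (k : Int) 2 = ((k / 2 : Nat) : Int) := by
  rw [PySem.Int.floordiv_eq_ediv_of_pos (by omega)]; omega

theorem pvMod2 (k : Nat) : PySem.Int.mod (k : Int) 2 = ((k % 2 : Nat) : Int) := by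
  rw [PySem.Int.mod_eq_emod_of_pos (by omega)]; omega

-- LSB-first bit list
def pvLsb : Nat → List Int
  | 0 => []
  | n+1 => (((n+1) % 2 : Nat) : Int) :: pvLsb ((n+1) / 2)

theorem pvLsb_eq_reverse_bits (n : Nat) : pvLsb n = (pvBits n).reverse := by
  induction n using Nat.strong_induction_on with
  | _ n ih =>
    match n with
    | 0 => simp [pvLsb, pvBits]
    | n+1 =>
      rw [pvLsb, pvBits, List.reverse_append, List.reverse_singleton,
        ← ih ((n+1)/2) (by omega)]
      rfl

theorem pvLoopA_nonpos (n r : Int) (h : n ≤ 0) : pvLoopA n r = r := by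
  rw [pvLoopA]; simp [show ¬ n > 0 by omega]

theorem pvLoopA_eq_foldl (m : Nat) (r : Int) :
    pvLoopA (m : Int) r = (pvLsb m).foldl (fun a b => 2 * a + b) r := by
  induction m using Nat.strong_induction_on generalizing r with
  | _ m ih =>
    match m with
    | 0 => rw [pvLoopA]; simp [pvLsb]
    | k+1 =>
      rw [pvLoopA]
      have h2 : (0:Int) < ((k+1:Nat) : Int) := by exact_mod_cast Nat.succ_pos k
      simp only [h2, dite_true, pvFdiv2, pvMod2]
      rw [ih ((k+1)/2) (by omega)]
      simp [pvLsb, mul_comm]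

theorem pvFromBits_append (l₁ l₂ : List Int) :
    pvFromBits (l₁ ++ l₂) = l₂.foldl (fun a b => 2 * a + b) (pvFromBits l₁) := by
  simp [pvFromBits, List.foldl_append]

theorem pvFromBits_bits (m : Nat) : pvFromBits (pvBits m) = (m : Int) := by
  induction m using Nat.strong_induction_on with
  | _ m ih =>
    match m with
    | 0 => simp [pvBits, pvFromBits]
    | k+1 =>
      rw [pvBits, pvFromBits_append, ih ((k+1)/2) (by omega)]
      simp
      have := Nat.div_add_mod (k+1) 2
      omega

theorem pvBits_succ_dropLast (k : Nat) : (pvBits (k+1)).dropLast = pvBits ((k+1)/2) := by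
  rw [pvBits, List.dropLast_concat]

-- ===== VERDICT (by name: the statement is the Claim_ definition above) =====
theorem make_palindrome_base_2_spec : Claim_equal_make_palindrome_base_2 := by
  intro number odd_length _
  unfold Spec_make_palindrome_base_2 make_palindrome_base_2 make_palindrome_base_2_alt
  by_cases hpos : number ≤ 0
  · -- A's loop never runs (the shifted value stays ≤ 0), B returns the guard value
    have hsh : PySem.Int.floordiv number 2 ≤ 0 := by
      have := PySem.Int.floordiv_mul_add_mod number 2
      have h1 := PySem.Int.mod_nonneg number (b := 2) (by omega)
      have h2 := PySem.Int.mod_lt number (b := 2) (by omega)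
      omega
    rw [if_pos hpos]
    cases odd_length
    · simp only [Bool.false_eq_true, if_false]; exact pvLoopA_nonpos _ _ hpos
    · simp only [if_true]; exact pvLoopA_nonpos _ _ hsh
  · -- number > 0: both sides fold the reversed bit list onto number
    obtain ⟨m, hm⟩ : ∃ m : Nat, number = ((m+1 : Nat) : Int) :=
      ⟨number.toNat - 1, by omega⟩
    subst hm
    simp only [if_neg hpos]
    have htoNat : (((m+1 : Nat) : Int)).toNat = m + 1 := by simp
    rw [htoNat]
    cases odd_length
    · simp only [if_false, Bool.false_eq_true]
      rw [pvLoopA_eq_foldl, pvFromBits_append, pvFromBits_bits,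
        pvLsb_eq_reverse_bits]
    · simp only [if_true]
      rw [pvFdiv2, pvLoopA_eq_foldl, pvFromBits_append,
        pvFromBits_bits, pvLsb_eq_reverse_bits, pvBits_succ_dropLast]
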